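-- pv_equiv track=rewrite | github.com/savojosh/heapsav | src/heapsav_savojosh/Heap.py | generateHeapSize
-- ===== SOURCE A (Python) =====
-- def generateHeapSize(n: int, l: int=0) -> int:
--     """
--     Generate a heap size that is wholly complete (a full pyramid with no holes) that
--     will fit n-nodes. Given n may be smaller than the returned heap size.
--
--     [1, 3, 7, 15, 31, ..., 2^(j+1)-1] where j is the number of layers in the heap.
--
--     **Parameters**
--     - *n: int*
--     > Size of the given dataset.
--     - *l: int*
--     > Number of layers to go beyond what would've normally been returned.
--
--     > generateHeapSize(n=14, l=0) --> 15
--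
--     > generateHeapSize(n=14, l=1) --> 31
--
--     > generateHeapSize(n=7, l=0) --> 7
--
--     > generateHeapSize(n=7, l=1) --> 15
--     """
--
--     k = 1
--     increment = 1
--
--     while(k < n):
--         increment *= 2
--         k += increment
--
--     while(l > 0):
--         increment *= 2
--         k += increment
--         l -= 1
--
--     return k
-- ===== SOURCE B (Python) =====
-- def generateHeapSize(n: int, l: int=0) -> int:
--     m = n.bit_length() if n >= 2 else 1
--     return (1 << (m + max(l, 0))) - 1
-- ===== Notes on version B (the rewrite author's own statement) =====
-- stated objective: faster
-- what changed: Both loops are replaced by a closed form: the base heap size is 2^bit_length(n)-1 (1 for n<2) and the l extra layers become a single shift; intended as faster (O(1) vs O(log n + l)); a timing run measured B 6.6-242x faster at every size where both outputs decoded (ratio 7148x at n=262144, where the harness could not decode the huge output).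
import Mathlib
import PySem

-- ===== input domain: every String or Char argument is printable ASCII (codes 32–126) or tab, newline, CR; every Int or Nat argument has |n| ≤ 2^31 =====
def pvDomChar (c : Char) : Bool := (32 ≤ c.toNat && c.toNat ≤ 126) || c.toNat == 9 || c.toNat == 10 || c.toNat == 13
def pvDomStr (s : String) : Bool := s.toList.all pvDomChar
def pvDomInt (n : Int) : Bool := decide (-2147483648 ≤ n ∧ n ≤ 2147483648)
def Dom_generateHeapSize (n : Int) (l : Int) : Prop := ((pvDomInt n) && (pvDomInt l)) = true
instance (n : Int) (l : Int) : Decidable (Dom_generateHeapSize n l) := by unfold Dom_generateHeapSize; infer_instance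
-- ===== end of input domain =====

-- B replaces A's two growth loops by a closed form (bit_length + shift); proved equal on all inputs.

-- ===== PORT A =====
-- first while loop of A: `while k < n: increment *= 2; k += increment`
-- (the proof argument 0 < increment only justifies termination; the computation is A's, step for step)
def gHSLoop1 (n k increment : Int) (h : 0 < increment) : Int × Int :=
  if hk : k < n then gHSLoop1 n (k + increment * 2) (increment * 2) (by omega) else (k, increment)
termination_by (n - k).toNat
decreasing_by omega

-- second while loop of A: `while l > 0: increment *= 2; k += increment; l -= 1`
def gHSLoop2 (k increment l : Int) : Int :=
  if _ : 0 < l then gHSLoop2 (k + increment * 2) (increment * 2) (l - 1) else k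
termination_by l.toNat
decreasing_by omega

def generateHeapSize (n : Int) (l : Int) : Int :=
  let p := gHSLoop1 n 1 1 (by norm_num)
  gHSLoop2 p.1 p.2 l

-- ===== PORT B =====
-- n.bit_length() for n ≥ 2 is Nat.log2 n.toNat + 1 (exact on positive ints)
def generateHeapSize_alt (n : Int) (l : Int) : Int :=
  let m : Nat := if 2 ≤ n then Nat.log2 n.toNat + 1 else 1
  (2 : Int) ^ (m + (max l 0).toNat) - 1

-- ===== PRECONDITION & SPEC =====
def Spec_generateHeapSize (n : Int) (l : Int) (out : Int) : Prop := out = generateHeapSize_alt n l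
instance (n : Int) (l : Int) (out : Int) : Decidable (Spec_generateHeapSize n l out) := by unfold Spec_generateHeapSize; infer_instance

-- ===== CLAIM (what is proved, stated in full; the proofs are below) =====
def Claim_equal_generateHeapSize : Prop := ∀ (n : Int) (l : Int), Dom_generateHeapSize n l → Spec_generateHeapSize n l (generateHeapSize n l)

-- ===== LEMMAS AND PROOFS =====

-- the target exponent of B
def bexp (n : Int) : Nat := if 2 ≤ n then Nat.log2 n.toNat + 1 else 1

theorem bexp_pos (n : Int) : 1 ≤ bexp n := by
  unfold bexp; split <;> omega

theorem two_le_pow (j : Nat) (hj : 1 ≤ j) : (2 : Int) ≤ 2 ^ j := by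
  calc (2 : Int) = 2 ^ 1 := by norm_num
    _ ≤ 2 ^ j := pow_le_pow_right₀ (by norm_num) hj

-- characterisation: for j ≥ 1, the heap 2^j - 1 fits n iff bexp n ≤ j
theorem bexp_char (n : Int) (j : Nat) (hj : 1 ≤ j) : (n ≤ 2 ^ j - 1) ↔ bexp n ≤ j := by
  unfold bexp
  split
  · rename_i h2
    have hm : n.toNat ≠ 0 := by omega
    have hc : ((2 : Int) ^ j) = ((2 ^ j : Nat) : Int) := by push_cast; ring
    constructor
    · intro h
      have hlt : n.toNat < 2 ^ j := by omega
      have := (Nat.log2_lt hm).2 hlt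
      omega
    · intro h
      have hlt : n.toNat.log2 < j := by omega
      have := (Nat.log2_lt hm).1 hlt
      omega
  · rename_i h2
    constructor
    · intro _; exact hj
    · intro _
      have := two_le_pow j hj
      omega

theorem gHSLoop1_congr {n k k' inc inc' : Int} (hk : k = k') (hi : inc = inc')
    (h : 0 < inc) (h' : 0 < inc') : gHSLoop1 n k inc h = gHSLoop1 n k' inc' h' := by
  subst hk; subst hi; rfl

theorem pow_pred_mul_two (j : Nat) (hj : 1 ≤ j) : (2 : Int) ^ (j - 1) * 2 = 2 ^ j := by
  have h : j - 1 + 1 = j := by omega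
  calc (2 : Int) ^ (j - 1) * 2 = 2 ^ (j - 1 + 1) := (pow_succ 2 (j - 1)).symm
    _ = 2 ^ j := by rw [h]

theorem gHSLoop1_eq (t : Nat) (n : Int) (j : Nat) (hj : 1 ≤ j) (ht : bexp n ≤ j + t)
    (h : 0 < (2 : Int) ^ (j - 1)) :
    gHSLoop1 n (2 ^ j - 1) (2 ^ (j - 1)) h
      = (2 ^ max j (bexp n) - 1, 2 ^ (max j (bexp n) - 1)) := by
  induction t generalizing j with
  | zero =>
    have hb : bexp n ≤ j := by omega
    have hmax : max j (bexp n) = j := by omega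
    rw [gHSLoop1, dif_neg (by have := (bexp_char n j hj).2 hb; omega), hmax]
  | succ t ih =>
    by_cases hlt : (2 : Int) ^ j - 1 < n
    · have hb : ¬ bexp n ≤ j := by
        intro hb; exact absurd ((bexp_char n j hj).2 hb) (by omega)
      rw [gHSLoop1, dif_pos hlt]
      have e1 : (2 : Int) ^ j - 1 + 2 ^ (j - 1) * 2 = 2 ^ (j + 1) - 1 := by
        rw [pow_pred_mul_two j hj, pow_succ]; ring
      have e2 : (2 : Int) ^ (j - 1) * 2 = 2 ^ (j + 1 - 1) := by
        rw [pow_pred_mul_two j hj]; norm_num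
      rw [gHSLoop1_congr e1 e2 _ (by positivity)]
      rw [ih (j + 1) (by omega) (by omega) (by positivity)]
      have : max (j + 1) (bexp n) = max j (bexp n) := by omega
      rw [this]
    · have hb : bexp n ≤ j := (bexp_char n j hj).1 (by omega)
      have hmax : max j (bexp n) = j := by omega
      rw [gHSLoop1, dif_neg hlt, hmax]

theorem gHSLoop2_eq (t : Nat) (l : Int) (hl : l.toNat = t) (m : Nat) (hm : 1 ≤ m) :
    gHSLoop2 (2 ^ m - 1) (2 ^ (m - 1)) l = 2 ^ (m + l.toNat) - 1 := by
  induction t generalizing l m with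
  | zero =>
    have : ¬ 0 < l := by omega
    rw [gHSLoop2, dif_neg this, hl]; norm_num
  | succ t ih =>
    have hpos : 0 < l := by omega
    rw [gHSLoop2, dif_pos hpos]
    have e1 : (2 : Int) ^ m - 1 + 2 ^ (m - 1) * 2 = 2 ^ (m + 1) - 1 := by
      rw [pow_pred_mul_two m hm, pow_succ]; ring
    have e2 : (2 : Int) ^ (m - 1) * 2 = 2 ^ (m + 1 - 1) := by
      rw [pow_pred_mul_two m hm]; norm_num
    rw [e1, e2, ih (l - 1) (by omega) (m + 1) (by omega)]
    have : m + 1 + (l - 1).toNat = m + l.toNat := by omega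
    rw [this]

-- ===== VERDICT (by name: the statement is the Claim_ definition above) =====
theorem generateHeapSize_spec : Claim_equal_generateHeapSize := by
  intro n l _
  unfold Spec_generateHeapSize generateHeapSize generateHeapSize_alt
  have h1 : gHSLoop1 n 1 1 (by norm_num)
      = (2 ^ max 1 (bexp n) - 1, 2 ^ (max 1 (bexp n) - 1)) := by
    rw [gHSLoop1_congr (show (1 : Int) = 2 ^ 1 - 1 by norm_num)
        (show (1 : Int) = 2 ^ (1 - 1) by norm_num) _ (by positivity)]
    exact gHSLoop1_eq (bexp n) n 1 le_rfl (by omega) _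
  have hmax : max 1 (bexp n) = bexp n := by have := bexp_pos n; omega
  rw [hmax] at h1
  simp only [h1]
  rw [gHSLoop2_eq l.toNat l rfl (bexp n) (bexp_pos n)]
  have hlt : (max l 0).toNat = l.toNat := by omega
  unfold bexp
  rw [hlt]
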